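-- pv_equiv track=rewrite | github.com/thisisjaypatil8/Authintic-Plagiarism-Detector | nlp-service/project/guidance_engine.py | extract_tips
-- ===== SOURCE A (Python) =====
-- def extract_tips(text):
--     """Extract numbered tips from Gemini response"""
--     tips = []
--     lines = text.split('\n')
--     in_tips_section = False
--
--     for line in lines:
--         line = line.strip()
--
--         # Check if we're in the TIPS section
--         if 'TIPS:' in line:
--             in_tips_section = True
--             continue
--
--         # Stop if we hit KEY PHRASES section
--         if 'KEY PHRASES:' in line:
--             break
--
--         # Extract tips (numbered items)
--         if in_tips_section and line:
--             # Match numbered items like "1.", "2.", etc.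
--             if line and (line[0].isdigit() or line.startswith(('- ', '• '))):
--                 # Remove numbering/bullets
--                 tip = line.lstrip('0123456789.-• ').strip()
--                 if tip and len(tip) > 10:  # Minimum length for valid tip
--                     tips.append(tip)
--
--     # If we didn't find tips in the structured format, try a more lenient approach
--     if not tips:
--         for line in lines:
--             line = line.strip()
--             if line and (line[0].isdigit() or line.startswith(('- ', '• '))):
--                 tip = line.lstrip('0123456789.-• ').strip()
--                 if tip and len(tip) > 10:
--                     tips.append(tip)
--
--     return tips[:5]  # Max 5 tips
-- ===== SOURCE B (Python) =====
-- def _first_index(lines, marker):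
--     """Index of the first line containing marker, or None."""
--     for i, ln in enumerate(lines):
--         if marker in ln:
--             return i
--     return None
--
--
-- def _tip(ln):
--     """Cleaned tip for a stripped line, or None if the line is not a tip."""
--     if ln and (ln[0].isdigit() or ln.startswith('- ') or ln.startswith('• ')):
--         t = ln.lstrip('0123456789.-• ').strip()
--         if len(t) > 10:
--             return t
--     return None
--
--
-- def extract_tips(text):
--     """Extract numbered tips from Gemini response"""
--     lines = [ln.strip() for ln in text.split('\n')]
--     start = _first_index(lines, 'TIPS:')
--     stop = _first_index(lines, 'KEY PHRASES:')
--     if stop is None: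
--         stop = len(lines)
--     tips = []
--     if start is not None:
--         tips = [t for ln in lines[start + 1:stop] for t in (_tip(ln),) if t is not None]
--     if not tips:
--         tips = [t for ln in lines for t in (_tip(ln),) if t is not None]
--     return tips[:5]
-- ===== Notes on version B (the rewrite author's own statement) =====
-- stated objective: alternative
-- what changed: A's single stateful scan with an in_tips_section flag and break is replaced by boundary-index computation (first line containing TIPS:, first line containing KEY PHRASES:) plus one shared tip filter applied to the slice between them, reused for the lenient fallback; Pre_ excludes texts in which 'TIPS:' occurs in more than one line or in a line also containing 'KEY PHRASES:', where A's check-TIPS-before-break-and-skip-later-markers scan order is an accidental choice and either reading of the section boundaries is defensible.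
import Mathlib
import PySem

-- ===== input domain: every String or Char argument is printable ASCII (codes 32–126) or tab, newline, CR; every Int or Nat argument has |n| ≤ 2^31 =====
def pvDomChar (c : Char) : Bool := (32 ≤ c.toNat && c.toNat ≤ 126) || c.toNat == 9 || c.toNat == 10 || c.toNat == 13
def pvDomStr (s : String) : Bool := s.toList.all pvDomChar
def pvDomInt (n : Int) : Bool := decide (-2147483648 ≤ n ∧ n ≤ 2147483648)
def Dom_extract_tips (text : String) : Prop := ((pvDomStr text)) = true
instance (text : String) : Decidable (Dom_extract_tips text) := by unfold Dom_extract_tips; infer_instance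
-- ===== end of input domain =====

-- B replaces A's stateful flag-and-break scan by boundary-index computation plus one shared tip
-- filter; objective: alternative decomposition, same cost, no speed claim.

-- text.split('\n'): '\n' is a fixed nonempty separator, so split? always returns some (shared by both ports)
def splitNL (text : String) : List String := (PySem.Str.split? text "\n").getD []

-- exact port of str.lstrip(chars): removes leading characters that occur in chars (appears in both Pythons)
def pyLstripChars (s chars : String) : String :=
  String.ofList (s.toList.dropWhile (fun c => chars.toList.contains c))

-- line[0].isdigit() on a (nonempty) string, as both Pythons write it
def firstDigit (s : String) : Bool :=
  match PySem.Str.pyGet? s 0 with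
  | some c => PySem.Chars.isdigit c
  | none => false

-- ===== PORT A =====
-- A's first for-loop: state = (in_tips_section, tips accumulator); 'break' returns acc
def extractLoopA : List String → Bool → List String → List String
  | [], _, acc => acc
  | l :: ls, ins, acc =>
    let line := PySem.Str.strip l
    if PySem.Str.isIn "TIPS:" line then extractLoopA ls true acc
    else if PySem.Str.isIn "KEY PHRASES:" line then acc
    else if ins && !(line == "") then
      if !(line == "") && (firstDigit line || PySem.Str.startswith line "- " || PySem.Str.startswith line "• ") then
        let tip := PySem.Str.strip (pyLstripChars line "0123456789.-• ")
        if !(tip == "") && decide (PySem.Str.len tip > 10) then extractLoopA ls ins (acc ++ [tip])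
        else extractLoopA ls ins acc
      else extractLoopA ls ins acc
    else extractLoopA ls ins acc

-- A's lenient second for-loop
def fallbackLoopA : List String → List String → List String
  | [], acc => acc
  | l :: ls, acc =>
    let line := PySem.Str.strip l
    if !(line == "") && (firstDigit line || PySem.Str.startswith line "- " || PySem.Str.startswith line "• ") then
      let tip := PySem.Str.strip (pyLstripChars line "0123456789.-• ")
      if !(tip == "") && decide (PySem.Str.len tip > 10) then fallbackLoopA ls (acc ++ [tip])
      else fallbackLoopA ls acc
    else fallbackLoopA ls acc

def extract_tips (text : String) : List String :=
  let lines := splitNL text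
  let tips := extractLoopA lines false []
  let tips := if tips = [] then fallbackLoopA lines [] else tips
  PySem.List.slice tips none (some 5)

-- ===== PORT B =====
-- B's _first_index helper
def firstIdx (marker : String) : List String → Option Nat
  | [] => none
  | l :: ls => if PySem.Str.isIn marker l then some 0 else (firstIdx marker ls).map (· + 1)

-- B's _tip helper
def tipOf (ln : String) : Option String :=
  if !(ln == "") && (firstDigit ln || PySem.Str.startswith ln "- " || PySem.Str.startswith ln "• ") then
    let t := PySem.Str.strip (pyLstripChars ln "0123456789.-• ")
    if decide (PySem.Str.len t > 10) then some t else none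
  else none

def extract_tips_alt (text : String) : List String :=
  let lines := (splitNL text).map PySem.Str.strip
  let start := firstIdx "TIPS:" lines
  let stop := (firstIdx "KEY PHRASES:" lines).getD lines.length
  let tips :=
    match start with
    | none => []
    | some m => (PySem.List.slice lines (some ((m : Int) + 1)) (some (stop : Int))).filterMap tipOf
  let tips := if tips = [] then lines.filterMap tipOf else tips
  PySem.List.slice tips none (some 5)

-- ===== PRECONDITION & SPEC =====
-- Pre_ excludes texts where 'TIPS:' occurs in more than one (stripped) line or in a line also
-- containing 'KEY PHRASES:': there the section boundaries are ambiguous and A's scan order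
-- (TIPS: tested before the break, later marker lines skipped) is one of two defensible readings.
def Pre_extract_tips (text : String) : Prop :=
  ((splitNL text).map PySem.Str.strip).countP (fun l => PySem.Str.isIn "TIPS:" l) ≤ 1 ∧
  ∀ l ∈ (splitNL text).map PySem.Str.strip,
    ¬(PySem.Str.isIn "TIPS:" l = true ∧ PySem.Str.isIn "KEY PHRASES:" l = true)
instance (text : String) : Decidable (Pre_extract_tips text) := by unfold Pre_extract_tips; infer_instance

def pvWitness_extract_tips : String := "TIPS:\n1. a valid long tip here"

def Spec_extract_tips (text : String) (out : List String) : Prop := out = extract_tips_alt text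
instance (text : String) (out : List String) : Decidable (Spec_extract_tips text out) := by unfold Spec_extract_tips; infer_instance

-- ===== CLAIM (what is proved, stated in full; the proofs are below) =====
def Claim_equal_extract_tips : Prop := ∀ (text : String), Dom_extract_tips text → Pre_extract_tips text → Spec_extract_tips text (extract_tips text)

-- ===== LEMMAS AND PROOFS =====

-- recursive characterization of B's "section" computation, used as the bridge between the two ports
def secRec : List String → List String
  | [] => []
  | l :: ls =>
    if PySem.Str.isIn "TIPS:" l then
      (ls.takeWhile (fun x => !PySem.Str.isIn "KEY PHRASES:" x)).filterMap tipOf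
    else if PySem.Str.isIn "KEY PHRASES:" l then []
    else secRec ls

-- A's and B's per-line tip conditions agree: a tip longer than 10 is in particular nonempty
theorem cond_eq (t : String) :
    (!(t == "") && decide (PySem.Str.len t > 10)) = decide (PySem.Str.len t > 10) := by
  cases h : (t == "") with
  | false => simp
  | true =>
    have : t = "" := by simpa using h
    subst this
    simp [PySem.Str.len]

-- tipOf written with A's inner condition
theorem tipOf_eq_A (ln : String) :
    tipOf ln =
      (if (!(ln == "") && (firstDigit ln || PySem.Str.startswith ln "- " || PySem.Str.startswith ln "• ")) = true then
        (if (!((PySem.Str.strip (pyLstripChars ln "0123456789.-• ")) == "") &&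
            decide (PySem.Str.len (PySem.Str.strip (pyLstripChars ln "0123456789.-• ")) > 10)) = true
         then some (PySem.Str.strip (pyLstripChars ln "0123456789.-• ")) else none)
       else none) := by
  simp only [tipOf, cond_eq]

-- take up to the first KEY PHRASES: line = takeWhile no KEY PHRASES:
theorem take_firstIdx (ls : List String) :
    ls.take ((firstIdx "KEY PHRASES:" ls).getD ls.length) =
      ls.takeWhile (fun x => !PySem.Str.isIn "KEY PHRASES:" x) := by
  induction ls with
  | nil => simp
  | cons l ls ih =>
    simp only [firstIdx, List.takeWhile_cons]
    cases h : PySem.Str.isIn "KEY PHRASES:" l with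
    | true => simp [h]
    | false =>
      simp only [h, Bool.false_eq_true, if_false, Bool.not_false, if_true]
      cases ho : firstIdx "KEY PHRASES:" ls with
      | none => simpa [ho] using congrArg (List.cons l) ih
      | some k => simpa [ho] using congrArg (List.cons l) ih

-- A's in-section loop (no further TIPS: lines) collects B's filtered tips up to the break
theorem extractLoopA_true (ls : List String) (acc : List String)
    (hT : ∀ l ∈ ls.map PySem.Str.strip, PySem.Str.isIn "TIPS:" l = false) :
    extractLoopA ls true acc =
      acc ++ ((ls.map PySem.Str.strip).takeWhile (fun x => !PySem.Str.isIn "KEY PHRASES:" x)).filterMap tipOf := by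
  induction ls generalizing acc with
  | nil => simp [extractLoopA]
  | cons l ls ih =>
    have hTl : PySem.Str.isIn "TIPS:" (PySem.Str.strip l) = false := hT _ (by simp)
    have hT' : ∀ x ∈ ls.map PySem.Str.strip, PySem.Str.isIn "TIPS:" x = false := by
      intro x hx; exact hT x (by simp [hx])
    simp only [List.map_cons, List.takeWhile_cons]
    cases hK : PySem.Str.isIn "KEY PHRASES:" (PySem.Str.strip l) with
    | true =>
      simp only [extractLoopA, hTl, Bool.false_eq_true, if_false, hK, eq_self_iff_true, if_true,
        Bool.not_true, List.filterMap_nil, List.append_nil]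
    | false =>
      simp only [hK, Bool.not_false, if_true, List.filterMap_cons]
      rw [tipOf_eq_A]
      simp only [extractLoopA, hTl, Bool.false_eq_true, if_false, hK, Bool.true_and]
      cases h1 : (!(PySem.Str.strip l == "") && (firstDigit (PySem.Str.strip l) ||
          PySem.Str.startswith (PySem.Str.strip l) "- " || PySem.Str.startswith (PySem.Str.strip l) "• ")) with
      | false =>
        cases hs : (PySem.Str.strip l == "") with
        | false => simp only [hs, Bool.not_false, if_true, h1, Bool.false_eq_true, if_false, ih _ hT']
        | true => simp only [hs, Bool.not_true, Bool.false_eq_true, if_false, h1, ih _ hT']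
      | true =>
        have hne : (PySem.Str.strip l == "") = false := by
          simp only [Bool.and_eq_true, Bool.not_eq_true'] at h1; exact h1.1
        simp only [hne, Bool.not_false, if_true, h1, eq_self_iff_true, if_true]
        cases h2 : (!(PySem.Str.strip (pyLstripChars (PySem.Str.strip l) "0123456789.-• ") == "") &&
            decide (PySem.Str.len (PySem.Str.strip (pyLstripChars (PySem.Str.strip l) "0123456789.-• ")) > 10)) with
        | false => simp only [h2, Bool.false_eq_true, if_false, ih _ hT']
        | true => simp only [h2, eq_self_iff_true, if_true, ih _ hT', List.append_assoc, List.singleton_append]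

-- A's whole first loop equals B's section (recursive form), under Pre_'s shape conditions
theorem extractLoopA_false (ls : List String) (acc : List String)
    (hc : (ls.map PySem.Str.strip).countP (fun l => PySem.Str.isIn "TIPS:" l) ≤ 1) :
    extractLoopA ls false acc = acc ++ secRec (ls.map PySem.Str.strip) := by
  induction ls generalizing acc with
  | nil => simp [extractLoopA, secRec]
  | cons l ls ih =>
    simp only [List.map_cons, secRec]
    cases hT : PySem.Str.isIn "TIPS:" (PySem.Str.strip l) with
    | true =>
      have hc0 : (ls.map PySem.Str.strip).countP (fun l => PySem.Str.isIn "TIPS:" l) = 0 := by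
        simp only [List.map_cons, List.countP_cons, hT, if_true] at hc
        omega
      have hT' : ∀ x ∈ ls.map PySem.Str.strip, PySem.Str.isIn "TIPS:" x = false := by
        intro x hx
        have := List.countP_eq_zero.mp hc0 x hx
        simpa using this
      simp only [extractLoopA, hT, if_true]
      simpa [hT] using extractLoopA_true ls acc hT'
    | false =>
      have hc' : (ls.map PySem.Str.strip).countP (fun l => PySem.Str.isIn "TIPS:" l) ≤ 1 := by
        simp only [List.map_cons, List.countP_cons, hT, Bool.false_eq_true, if_false] at hc
        omega
      cases hK : PySem.Str.isIn "KEY PHRASES:" (PySem.Str.strip l) with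
      | true =>
        simp only [extractLoopA, hT, Bool.false_eq_true, if_false, hK, eq_self_iff_true, if_true,
          List.append_nil]
      | false =>
        simp only [extractLoopA, hT, Bool.false_eq_true, if_false, hK, Bool.false_and]
        exact ih acc hc'

-- B's index/slice section computation equals the recursive form, under Pre_'s no-both condition
theorem sectionB_eq_secRec (L : List String)
    (hb : ∀ l ∈ L, ¬(PySem.Str.isIn "TIPS:" l = true ∧ PySem.Str.isIn "KEY PHRASES:" l = true)) :
    (match firstIdx "TIPS:" L with
     | none => ([] : List String)
     | some m => (PySem.List.slice L (some ((m : Int) + 1)) (some (((firstIdx "KEY PHRASES:" L).getD L.length : Nat) : Int))).filterMap tipOf)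
      = secRec L := by
  induction L with
  | nil => rfl
  | cons l ls ih =>
    have hb' : ∀ x ∈ ls, ¬(PySem.Str.isIn "TIPS:" x = true ∧ PySem.Str.isIn "KEY PHRASES:" x = true) := by
      intro x hx; exact hb x (by simp [hx])
    cases hT : PySem.Str.isIn "TIPS:" l with
    | true =>
      have hK : PySem.Str.isIn "KEY PHRASES:" l = false := by
        have := hb l (by simp)
        cases hk : PySem.Str.isIn "KEY PHRASES:" l with
        | false => rfl
        | true => exact absurd ⟨hT, hk⟩ this
      simp only [secRec, hT, if_true, firstIdx, hK, Bool.false_eq_true, if_false]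
      have harith : (((firstIdx "KEY PHRASES:" ls).map (· + 1)).getD (l :: ls).length) =
          (firstIdx "KEY PHRASES:" ls).getD ls.length + 1 := by
        cases ho : firstIdx "KEY PHRASES:" ls with
        | none => simp [ho]
        | some k => simp [ho]
      rw [harith]
      have e1 : (((0 : Nat) : Int) + 1) = ((1 : Nat) : Int) := by norm_num
      rw [e1, PySem.List.slice_natCast]
      simp only [List.drop_succ_cons, List.drop_zero, Nat.add_sub_cancel]
      rw [take_firstIdx]
    | false =>
      cases hK : PySem.Str.isIn "KEY PHRASES:" l with
      | true =>
        simp only [secRec, hT, Bool.false_eq_true, if_false, hK, if_true, firstIdx]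
        cases ho : firstIdx "TIPS:" ls with
        | none => simp [ho, hT]
        | some m =>
          simp only [ho, hT, Bool.false_eq_true, if_false, hK, if_true, Option.map_some, Option.getD_some]
          have hsl : PySem.List.slice (l :: ls) (some (((m + 1 : Nat) : Int) + 1)) (some ((0 : Nat) : Int)) = [] := by
            have h2 : (((m + 1 : Nat) : Int) + 1) = ((m + 2 : Nat) : Int) := by push_cast; ring
            rw [h2, PySem.List.slice_natCast]
            simp
          simpa using congrArg (List.filterMap tipOf) hsl
      | false =>
        simp only [secRec, hT, Bool.false_eq_true, if_false, hK, firstIdx]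
        rw [← ih hb']
        cases ho : firstIdx "TIPS:" ls with
        | none => simp [ho]
        | some m =>
          simp only [ho, Option.map_some, Option.getD_some]
          congr 1
          have harith : (((firstIdx "KEY PHRASES:" ls).map (· + 1)).getD (l :: ls).length) =
              (firstIdx "KEY PHRASES:" ls).getD ls.length + 1 := by
            cases hk : firstIdx "KEY PHRASES:" ls with
            | none => simp [hk]
            | some k => simp [hk]
          rw [harith]
          have h1 : (((m + 1 : Nat) : Int) + 1) = ((m + 2 : Nat) : Int) := by push_cast; ring
          have h3 : (((m : Nat) : Int) + 1) = ((m + 1 : Nat) : Int) := by push_cast; ring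
          rw [h1, h3, PySem.List.slice_natCast, PySem.List.slice_natCast]
          simp only [List.drop_succ_cons]
          congr 1
          omega

-- A's lenient loop is B's filterMap over all stripped lines
theorem fallbackLoopA_eq (ls : List String) (acc : List String) :
    fallbackLoopA ls acc = acc ++ (ls.map PySem.Str.strip).filterMap tipOf := by
  induction ls generalizing acc with
  | nil => simp [fallbackLoopA]
  | cons l ls ih =>
    simp only [List.map_cons, List.filterMap_cons, fallbackLoopA]
    rw [tipOf_eq_A]
    cases h1 : (!(PySem.Str.strip l == "") && (firstDigit (PySem.Str.strip l) ||
        PySem.Str.startswith (PySem.Str.strip l) "- " || PySem.Str.startswith (PySem.Str.strip l) "• ")) with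
    | false => simp only [h1, Bool.false_eq_true, if_false, ih]
    | true =>
      simp only [h1, eq_self_iff_true, if_true]
      cases h2 : (!(PySem.Str.strip (pyLstripChars (PySem.Str.strip l) "0123456789.-• ") == "") &&
          decide (PySem.Str.len (PySem.Str.strip (pyLstripChars (PySem.Str.strip l) "0123456789.-• ")) > 10)) with
      | false => simp only [h2, Bool.false_eq_true, if_false, ih]
      | true => simp only [h2, eq_self_iff_true, if_true, ih, List.append_assoc, List.singleton_append]

-- ===== VERDICT (by name: the statement is the Claim_ definition above) =====
theorem extract_tips_spec : Claim_equal_extract_tips := by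
  intro text _ hpre
  obtain ⟨hc, hb⟩ := hpre
  unfold Spec_extract_tips extract_tips extract_tips_alt
  simp only [extractLoopA_false _ _ hc, fallbackLoopA_eq, List.nil_append,
    ← sectionB_eq_secRec _ hb]
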